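-- pv_equiv track=rewrite | github.com/ryanhan1201/Compiler_ChocoPy | pa4-benches/program_250_1.py | calloc
-- ===== SOURCE A (Python) =====
-- def calloc(n:int, m:int) -> [[int]]:
--     lst:[[int]] = None
--     i:int = 0
--     lst = [None]
--     while len(lst) < n:
--         lst = lst + lst
--
--     while i < n:
--         lst[i] = [-1]
--         while len(lst[i]) < m:
--             lst[i] = lst[i] + lst[i]
--         i = i + 1
--
--
--     return lst
-- ===== SOURCE B (Python) =====
-- def _round_up_pow2(x: int) -> int:
--     """Smallest power of two >= x (and >= 1)."""
--     return 1 << max(x - 1, 0).bit_length()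
--
--
-- def calloc(n: int, m: int):
--     """Allocate a table with power-of-two capacities: the first n slots hold
--     fresh rows of -1 (row capacity rounded up from m), spare slots are empty."""
--     row_cap = _round_up_pow2(m)
--     return [[-1] * row_cap if i < n else None for i in range(_round_up_pow2(n))]
-- ===== Notes on version B (the rewrite author's own statement) =====
-- stated objective: simpler
-- what changed: B computes the power-of-two capacities in closed form via bit_length and allocates the table with one comprehension, replacing A's two data-doubling self-concatenation loops.
import Mathlib
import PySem

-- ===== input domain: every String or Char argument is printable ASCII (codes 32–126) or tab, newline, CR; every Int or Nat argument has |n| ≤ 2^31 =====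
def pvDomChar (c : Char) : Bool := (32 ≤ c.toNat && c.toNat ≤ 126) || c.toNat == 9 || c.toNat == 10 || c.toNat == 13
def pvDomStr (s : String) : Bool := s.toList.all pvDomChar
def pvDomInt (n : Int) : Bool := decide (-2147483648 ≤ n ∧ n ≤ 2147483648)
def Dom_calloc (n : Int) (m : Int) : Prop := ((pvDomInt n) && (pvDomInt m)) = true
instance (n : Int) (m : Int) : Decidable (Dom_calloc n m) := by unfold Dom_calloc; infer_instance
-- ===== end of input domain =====

-- B allocates the power-of-two-capacity table directly (bit_length rounding + one
-- comprehension) instead of A's two self-concatenation doubling loops; objective: simpler.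

-- ===== PORT A =====
-- the 'while len(lst) < bound: lst = lst + lst' doubling loop; fuel bounds the
-- number of doublings (fuel = bound.toNat + 1 always suffices: length doubles from ≥ 1)
def pyDouble {α : Type} (fuel : Nat) (bound : Int) (lst : List α) : List α :=
  match fuel with
  | 0 => lst
  | f + 1 => if (lst.length : Int) < bound then pyDouble f bound (lst ++ lst) else lst

-- the 'while i < n: lst[i] = <row>; i = i + 1' loop (row = [-1] doubled to ≥ m)
def pyRowsLoop (fuel : Nat) (n : Int) (m : Int) (i : Nat)
    (lst : List (Option (List Int))) : List (Option (List Int)) :=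
  match fuel with
  | 0 => lst
  | f + 1 =>
    if (i : Int) < n then
      pyRowsLoop f n m (i + 1) (lst.set i (some (pyDouble (m.toNat + 1) m [-1])))
    else lst

def calloc (n : Int) (m : Int) : List (Option (List Int)) :=
  pyRowsLoop n.toNat n m 0 (pyDouble (n.toNat + 1) n [none])

-- ===== PORT B =====
-- '1 << max(x - 1, 0).bit_length()'; bit_length of a Nat is Nat.size
def roundUpPow2 (x : Int) : Nat := 2 ^ Nat.size (x - 1).toNat

-- '[[-1] * row_cap if i < n else None for i in range(_round_up_pow2(n))]'
def calloc_alt (n : Int) (m : Int) : List (Option (List Int)) :=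
  (List.range (roundUpPow2 n)).map
    (fun (i : Nat) => if (i : Int) < n
      then some (List.replicate (roundUpPow2 m) (-1 : Int)) else none)

-- ===== PRECONDITION & SPEC =====
def Spec_calloc (n : Int) (m : Int) (out : List (Option (List Int))) : Prop := out = calloc_alt n m
instance (n : Int) (m : Int) (out : List (Option (List Int))) : Decidable (Spec_calloc n m out) := by unfold Spec_calloc; infer_instance

-- ===== CLAIM (what is proved, stated in full; the proofs are below) =====
def Claim_equal_calloc : Prop := ∀ (n : Int) (m : Int), Dom_calloc n m → Spec_calloc n m (calloc n m)

-- ===== LEMMAS AND PROOFS =====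

-- length evolution of the doubling loop, as a Nat recursion
def gN (fuel : Nat) (bound : Int) (k : Nat) : Nat :=
  match fuel with
  | 0 => k
  | f + 1 => if (k : Int) < bound then gN f bound (k + k) else k

lemma pyDouble_replicate {α : Type} (x : α) :
    ∀ (f : Nat) (b : Int) (k : Nat),
      pyDouble f b (List.replicate k x) = List.replicate (gN f b k) x := by
  intro f
  induction f with
  | zero => intro b k; rfl
  | succ f ih =>
    intro b k
    simp only [pyDouble, gN, List.length_replicate]
    split
    · rw [← List.replicate_add, ih]
    · rfl

lemma gN_pow (b : Int) :
    ∀ (f j : Nat), b.toNat ≤ 2 ^ (j + f) →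
      gN f b (2 ^ j) = if b ≤ ((2 ^ j : Nat) : Int) then 2 ^ j else 2 ^ Nat.size (b.toNat - 1) := by
  intro f
  induction f with
  | zero =>
    intro j h
    rw [Nat.add_zero] at h
    have hb : b ≤ ((2 ^ j : Nat) : Int) := by omega
    simp only [gN]
    rw [if_pos hb]
  | succ f ih =>
    intro j h
    simp only [gN]
    by_cases hc : ((2 ^ j : Nat) : Int) < b
    · rw [if_pos hc]
      have h2 : (2 ^ j + 2 ^ j : Nat) = 2 ^ (j + 1) := by rw [pow_succ]; ring
      rw [h2, ih (j + 1) (by rw [show j + 1 + f = j + (f + 1) by omega]; exact h)]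
      have hne : ¬ b ≤ ((2 ^ j : Nat) : Int) := by omega
      rw [if_neg hne]
      by_cases hc2 : b ≤ ((2 ^ (j + 1) : Nat) : Int)
      · rw [if_pos hc2]
        have hp : (2 : Nat) ^ (j + 1) = 2 * 2 ^ j := by rw [pow_succ]; ring
        have h1 : 2 ^ j ≤ b.toNat - 1 := by omega
        have h2' : b.toNat - 1 < 2 ^ (j + 1) := by omega
        have hsle : Nat.size (b.toNat - 1) ≤ j + 1 := Nat.size_le.mpr h2'
        have hslt : j < Nat.size (b.toNat - 1) := by
          by_contra hcon
          have hle : Nat.size (b.toNat - 1) ≤ j := by omega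
          have := Nat.size_le.mp hle
          omega
        have hs : Nat.size (b.toNat - 1) = j + 1 := by omega
        rw [hs]
      · rw [if_neg hc2]
    · rw [if_neg hc]
      have hb : b ≤ ((2 ^ j : Nat) : Int) := by omega
      rw [if_pos hb]

lemma pyDouble_roundUpPow2 {α : Type} (x : α) (b : Int) :
    pyDouble (b.toNat + 1) b [x] = List.replicate (roundUpPow2 b) x := by
  have h1 : [x] = List.replicate (2 ^ 0) x := rfl
  rw [h1, pyDouble_replicate]
  have hf : b.toNat ≤ 2 ^ (0 + (b.toNat + 1)) := by
    have := Nat.lt_two_pow_self (n := b.toNat)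
    have h2 : 2 ^ b.toNat ≤ 2 ^ (0 + (b.toNat + 1)) :=
      Nat.pow_le_pow_right (by norm_num) (by omega)
    omega
  rw [gN_pow b _ 0 hf]
  unfold roundUpPow2
  by_cases hb : b ≤ 1
  · rw [if_pos (by push_cast; omega)]
    have : (b - 1).toNat = 0 := by omega
    simp [this, Nat.size_zero]
  · rw [if_neg (by push_cast; omega)]
    have : (b - 1).toNat = b.toNat - 1 := by omega
    rw [this]

lemma roundUpPow2_ge (b : Int) : b.toNat ≤ roundUpPow2 b := by
  unfold roundUpPow2
  have h1 : (b - 1).toNat < 2 ^ Nat.size (b - 1).toNat := Nat.lt_size_self _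
  omega

lemma set_replicate_append {α : Type} (r v w : α) :
    ∀ (i k : Nat), 1 ≤ k →
      (List.replicate i r ++ List.replicate k v).set i w
        = List.replicate i r ++ (w :: List.replicate (k - 1) v) := by
  intro i
  induction i with
  | zero =>
    intro k hk
    cases k with
    | zero => omega
    | succ k => simp [List.replicate_succ]
  | succ i ih =>
    intro k hk
    simp only [List.replicate_succ, List.cons_append, List.set_cons_succ]
    rw [ih k hk]

lemma pyRowsLoop_spec (n m : Int) (NP : Nat) (hNP : n.toNat ≤ NP) :
    ∀ (f i : Nat), i ≤ n.toNat → n.toNat - i ≤ f →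
      pyRowsLoop f n m i
          (List.replicate i (some (pyDouble (m.toNat + 1) m [-1]))
            ++ List.replicate (NP - i) none)
        = List.replicate n.toNat (some (pyDouble (m.toNat + 1) m [-1]))
            ++ List.replicate (NP - n.toNat) none := by
  intro f
  induction f with
  | zero =>
    intro i h1 h2
    have : i = n.toNat := by omega
    subst this
    rfl
  | succ f ih =>
    intro i h1 h2
    simp only [pyRowsLoop]
    by_cases hc : (i : Int) < n
    · have hi : i < n.toNat := by omega
      rw [if_pos hc]
      have hk : 1 ≤ NP - i := by omega
      rw [set_replicate_append _ _ _ i (NP - i) hk]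
      have heq : List.replicate i (some (pyDouble (m.toNat + 1) m [-1]))
            ++ (some (pyDouble (m.toNat + 1) m [-1]) :: List.replicate (NP - i - 1) none)
          = List.replicate (i + 1) (some (pyDouble (m.toNat + 1) m [-1]))
            ++ List.replicate (NP - (i + 1)) none := by
        rw [List.replicate_succ' (n := i), List.append_assoc]
        simp [show NP - i - 1 = NP - (i + 1) by omega]
      rw [heq, ih (i + 1) (by omega) (by omega)]
    · have : i = n.toNat := by omega
      subst this
      rw [if_neg hc]

-- B's comprehension over range(capacity) is the initialized prefix ++ the empty tail
lemma map_range_if {α : Type} (a b : α) :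
    ∀ (c k : Nat), (List.range c).map (fun i => if i < k then a else b)
      = List.replicate (min k c) a ++ List.replicate (c - k) b := by
  intro c
  induction c with
  | zero => intro k; simp
  | succ c ih =>
    intro k
    rw [List.range_succ, List.map_append, ih]
    by_cases hk : c < k
    · have h1 : min k c = c := by omega
      have h2 : min k (c + 1) = c + 1 := by omega
      simp [hk, h1, show c - k = 0 by omega, show c + 1 - k = 0 by omega,
        List.replicate_succ' (n := c)]
    · have h1 : min k c = k := by omega
      have h2 : min k (c + 1) = k := by omega
      simp only [List.map_cons, List.map_nil, if_neg hk, h1, h2, List.append_assoc]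
      rw [show c + 1 - k = (c - k) + 1 by omega, List.replicate_succ' (n := c - k)]

-- ===== VERDICT (by name: the statement is the Claim_ definition above) =====
theorem calloc_spec : Claim_equal_calloc := by
  intro n m _
  unfold Spec_calloc calloc calloc_alt
  rw [pyDouble_roundUpPow2]
  have h := pyRowsLoop_spec n m (roundUpPow2 n) (roundUpPow2_ge n) n.toNat 0 (by omega) (by omega)
  simp only [List.replicate_zero, List.nil_append, Nat.sub_zero] at h
  rw [h, pyDouble_roundUpPow2]
  have hfun : (fun i : Nat => if (i : Int) < n
        then some (List.replicate (roundUpPow2 m) (-1 : Int)) else none)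
      = fun i : Nat => if i < n.toNat
        then some (List.replicate (roundUpPow2 m) (-1 : Int)) else none := by
    funext i
    by_cases hi : (i : Int) < n
    · rw [if_pos hi, if_pos (by omega)]
    · rw [if_neg hi, if_neg (by omega)]
  rw [hfun, map_range_if]
  rw [min_eq_left (roundUpPow2_ge n)]
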